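-- pv_equiv track=rewrite | github.com/Zavanne/python-lists-loops-programming-exercises | exercises/16-Techno_beat/app.py | lyrics_generator
-- ===== SOURCE A (Python) =====
-- def lyrics_generator(list_of_beats):
--     song_lyrics = ""
--     effect = 0
--     for beat in list_of_beats:
--         if beat == 0:
--             song_lyrics += "Boom "
--             effect = 0
--         else:
--             song_lyrics += "Drop the bass "
--             effect += 1
--         if effect == 3:
--             song_lyrics += "!!!Break the bass!!! "
--             effect = 0
--     return song_lyrics
-- ===== SOURCE B (Python) =====
-- def lyrics_generator(list_of_beats):
--     # run-based: split into maximal runs of zeros / non-zeros, emit each run's text at once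
--     parts = []
--     i, n = 0, len(list_of_beats)
--     while i < n:
--         j = i
--         if list_of_beats[i] == 0:
--             while j < n and list_of_beats[j] == 0:
--                 j += 1
--             parts.append("Boom " * (j - i))
--         else:
--             while j < n and list_of_beats[j] != 0:
--                 j += 1
--             k = j - i
--             parts.append(("Drop the bass " * 3 + "!!!Break the bass!!! ") * (k // 3)
--                          + "Drop the bass " * (k % 3))
--         i = j
--     return "".join(parts)
-- ===== Notes on version B (the rewrite author's own statement) =====
-- stated objective: alternative
-- what changed: B replaces A's flat pass with a reset-on-3 counter by a run-splitting pass: it finds each maximal run of zeros / non-zeros and emits the whole run's text at once using a closed-form repetition ('Boom '*len for zero runs, (3 drops + break)*(k//3) + drop*(k%3) for non-zero runs).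
import Mathlib
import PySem

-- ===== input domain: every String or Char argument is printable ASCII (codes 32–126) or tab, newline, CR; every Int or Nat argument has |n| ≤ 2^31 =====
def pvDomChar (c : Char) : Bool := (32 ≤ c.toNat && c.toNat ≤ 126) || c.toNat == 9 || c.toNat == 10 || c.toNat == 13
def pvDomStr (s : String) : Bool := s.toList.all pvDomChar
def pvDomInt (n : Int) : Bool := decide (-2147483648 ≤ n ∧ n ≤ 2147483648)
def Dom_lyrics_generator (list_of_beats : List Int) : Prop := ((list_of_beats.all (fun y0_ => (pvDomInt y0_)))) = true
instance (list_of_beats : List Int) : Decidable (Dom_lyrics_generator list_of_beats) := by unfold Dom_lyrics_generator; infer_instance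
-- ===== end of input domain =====

-- B rewrites A's flat counter pass as a run-splitting pass with closed-form repetition per run (alternative decomposition, same cost).

-- ===== PORT A =====
-- A: one fold carrying (song_lyrics, effect); effect resets on zero and on reaching 3.
def lyricsStepA (st : String × Int) (beat : Int) : String × Int :=
  let st' := if beat = 0 then (st.1 ++ "Boom ", (0 : Int)) else (st.1 ++ "Drop the bass ", st.2 + 1)
  if st'.2 = 3 then (st'.1 ++ "!!!Break the bass!!! ", 0) else st'

def lyrics_generator (list_of_beats : List Int) : String :=
  (list_of_beats.foldl lyricsStepA ("", 0)).1

-- ===== PORT B =====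
-- 'Boom ' * n  (Python string repetition)
def pvRep (s : String) : Nat → String
  | 0 => ""
  | n + 1 => s ++ pvRep s n

theorem pvDropWhile_cons_lt {p : Int → Bool} (b : Int) (t : List Int) (_h : p b = true) :
    (List.dropWhile p (b :: t)).length < (b :: t).length := by
  simp [List.dropWhile, _h]
  exact List.length_dropWhile_le p t

-- B: split off one maximal run at a time, emit its text in closed form.
def lyrics_generator_alt (list_of_beats : List Int) : String :=
  match list_of_beats with
  | [] => ""
  | b :: t =>
    if h : b = 0 then
      pvRep "Boom " ((b :: t).takeWhile (fun x => x == 0)).length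
        ++ lyrics_generator_alt ((b :: t).dropWhile (fun x => x == 0))
    else
      let k := ((b :: t).takeWhile (fun x => x != 0)).length
      pvRep ("Drop the bass " ++ ("Drop the bass " ++ ("Drop the bass " ++ "!!!Break the bass!!! "))) (k / 3)
        ++ pvRep "Drop the bass " (k % 3)
        ++ lyrics_generator_alt ((b :: t).dropWhile (fun x => x != 0))
  termination_by list_of_beats.length
  decreasing_by
  · exact pvDropWhile_cons_lt b t (by simp [h])
  · exact pvDropWhile_cons_lt b t (by simp [h])

-- ===== PRECONDITION & SPEC =====
def Spec_lyrics_generator (list_of_beats : List Int) (out : String) : Prop := out = lyrics_generator_alt list_of_beats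
instance (list_of_beats : List Int) (out : String) : Decidable (Spec_lyrics_generator list_of_beats out) := by unfold Spec_lyrics_generator; infer_instance

-- ===== CLAIM (what is proved, stated in full; the proofs are below) =====
def Claim_equal_lyrics_generator : Prop := ∀ (list_of_beats : List Int), Dom_lyrics_generator list_of_beats → Spec_lyrics_generator list_of_beats (lyrics_generator list_of_beats)

-- ===== LEMMAS AND PROOFS =====

-- f l e : the text A appends when processing l starting with counter e
def lyrF : List Int → Int → String
  | [], _ => ""
  | b :: t, e =>
    let w := if b = 0 then ("Boom ", (0 : Int)) else ("Drop the bass ", e + 1)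
    if w.2 = 3 then w.1 ++ ("!!!Break the bass!!! " ++ lyrF t 0) else w.1 ++ lyrF t w.2

theorem lyrF_fold (l : List Int) : ∀ (s : String) (e : Int),
    (l.foldl lyricsStepA (s, e)).1 = s ++ lyrF l e := by
  induction l with
  | nil => intro s e; simp [lyrF]
  | cons b t ih =>
    intro s e
    by_cases hb : b = 0
    · simp [lyricsStepA, lyrF, hb, ih, String.append_assoc]
    · by_cases he : e + 1 = 3
      · simp [lyricsStepA, lyrF, hb, he, ih, String.append_assoc]
        rw [← String.append_assoc]
        congr 1
      · simp [lyricsStepA, lyrF, hb, he, ih, String.append_assoc]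

-- g k e : the text A appends for a run of k non-zero beats starting with counter e
def lyrG : Nat → Int → String
  | 0, _ => ""
  | k + 1, e =>
    if e + 1 = 3 then "Drop the bass " ++ ("!!!Break the bass!!! " ++ lyrG k 0)
    else "Drop the bass " ++ lyrG k (e + 1)

theorem lyrF_run : ∀ (l : List Int), (∀ x ∈ l, x ≠ 0) → ∀ (rest : List Int),
    (rest = [] ∨ ∃ r, rest = 0 :: r) → ∀ e,
    lyrF (l ++ rest) e = lyrG l.length e ++ lyrF rest 0 := by
  intro l
  induction l with
  | nil =>
    intro _ rest hrest e
    rcases hrest with h | ⟨r, h⟩ <;> subst h <;> simp [lyrF, lyrG]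
  | cons b t ih =>
    intro hnz rest hrest e
    have hb : b ≠ 0 := hnz b (List.mem_cons_self ..)
    have ih' := ih (fun x hx => hnz x (List.mem_cons_of_mem _ hx)) rest hrest
    by_cases he : e + 1 = 3 <;>
      simp [lyrF, lyrG, hb, he, ih', String.append_assoc]

theorem lyrG_closed : ∀ k : Nat, lyrG k 0 =
    pvRep ("Drop the bass " ++ ("Drop the bass " ++ ("Drop the bass " ++ "!!!Break the bass!!! "))) (k / 3)
      ++ pvRep "Drop the bass " (k % 3) := by
  intro k
  induction k using Nat.strong_induction_on with
  | _ k ih =>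
    match k with
    | 0 => simp [lyrG, pvRep]
    | 1 => simp [lyrG, pvRep]
    | 2 => simp [lyrG, pvRep]
    | m + 3 =>
      have h1 : lyrG (m + 3) 0 = "Drop the bass " ++ ("Drop the bass " ++ ("Drop the bass " ++
          ("!!!Break the bass!!! " ++ lyrG m 0))) := by
        simp [lyrG]
      have hdiv : (m + 3) / 3 = m / 3 + 1 := by omega
      have hmod : (m + 3) % 3 = m % 3 := by omega
      rw [h1, ih m (by omega), hdiv, hmod, pvRep]
      simp only [String.append_assoc]

theorem lyrF_boomrun : ∀ (l : List Int), (∀ x ∈ l, x = 0) → ∀ (rest : List Int),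
    lyrF (l ++ rest) 0 = pvRep "Boom " l.length ++ lyrF rest 0 := by
  intro l
  induction l with
  | nil => intro _ rest; simp [pvRep]
  | cons b t ih =>
    intro hz rest
    have hb : b = 0 := hz b (List.mem_cons_self ..)
    simp [lyrF, hb, pvRep, ih (fun x hx => hz x (List.mem_cons_of_mem _ hx)) rest,
      String.append_assoc]

theorem dropWhile_shape (p : Int → Bool) (l : List Int) :
    List.dropWhile p l = [] ∨ ∃ b r, List.dropWhile p l = b :: r ∧ p b = false := by
  induction l with
  | nil => left; rfl
  | cons b t ih =>
    by_cases h : p b = true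
    · simpa [List.dropWhile, h] using ih
    · right; exact ⟨b, t, by simp [List.dropWhile, h], by simpa using h⟩

theorem lyrF_alt_aux : ∀ (n : Nat) (l : List Int), l.length ≤ n →
    lyrF l 0 = lyrics_generator_alt l := by
  intro n
  induction n with
  | zero =>
    intro l hl
    have : l = [] := List.eq_nil_of_length_eq_zero (Nat.le_zero.mp hl)
    subst this; simp [lyrF, lyrics_generator_alt]
  | succ n ih =>
    intro l hl
    match l with
    | [] => simp [lyrF, lyrics_generator_alt]
    | b :: t =>
      by_cases hb : b = 0
      · rw [lyrics_generator_alt]; rw [dif_pos hb]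
        have hsplit := List.takeWhile_append_dropWhile (p := fun x : Int => x == 0) (l := b :: t)
        have hz : ∀ x ∈ (b :: t).takeWhile (fun x : Int => x == 0), x = 0 := by
          intro x hx
          simpa using List.mem_takeWhile_imp hx
        have hlen : ((b :: t).dropWhile (fun x : Int => x == 0)).length < (b :: t).length :=
          pvDropWhile_cons_lt b t (by simp [hb])
        calc lyrF (b :: t) 0
            = lyrF ((b :: t).takeWhile (fun x : Int => x == 0)
                ++ (b :: t).dropWhile (fun x : Int => x == 0)) 0 := by rw [hsplit]
          _ = pvRep "Boom " ((b :: t).takeWhile (fun x : Int => x == 0)).length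
                ++ lyrF ((b :: t).dropWhile (fun x : Int => x == 0)) 0 := lyrF_boomrun _ hz _
          _ = _ := by
                rw [ih _ (by omega)]
      · rw [lyrics_generator_alt]; rw [dif_neg hb]
        have hsplit := List.takeWhile_append_dropWhile (p := fun x : Int => x != 0) (l := b :: t)
        have hz : ∀ x ∈ (b :: t).takeWhile (fun x : Int => x != 0), x ≠ 0 := by
          intro x hx
          simpa using List.mem_takeWhile_imp hx
        have hrest : (b :: t).dropWhile (fun x : Int => x != 0) = [] ∨
            ∃ r, (b :: t).dropWhile (fun x : Int => x != 0) = 0 :: r := by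
          rcases dropWhile_shape (fun x : Int => x != 0) (b :: t) with h | ⟨c, r, h, hc⟩
          · left; exact h
          · right
            have : c = 0 := by simpa using hc
            exact ⟨r, by rw [h, this]⟩
        have hlen : ((b :: t).dropWhile (fun x : Int => x != 0)).length < (b :: t).length :=
          pvDropWhile_cons_lt b t (by simp [hb])
        calc lyrF (b :: t) 0
            = lyrF ((b :: t).takeWhile (fun x : Int => x != 0)
                ++ (b :: t).dropWhile (fun x : Int => x != 0)) 0 := by rw [hsplit]
          _ = lyrG ((b :: t).takeWhile (fun x : Int => x != 0)).length 0
                ++ lyrF ((b :: t).dropWhile (fun x : Int => x != 0)) 0 :=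
              lyrF_run _ hz _ hrest 0
          _ = _ := by
                rw [ih _ (by omega), lyrG_closed, String.append_assoc]

theorem lyrF_alt (l : List Int) : lyrF l 0 = lyrics_generator_alt l :=
  lyrF_alt_aux l.length l (Nat.le_refl _)

-- ===== VERDICT (by name: the statement is the Claim_ definition above) =====
theorem lyrics_generator_spec : Claim_equal_lyrics_generator := by
  intro l _
  unfold Spec_lyrics_generator lyrics_generator
  rw [lyrF_fold, ← lyrF_alt l]
  simp
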